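-- pv_equiv track=rewrite | github.com/nonpeera/IEEExtreme | Non/Doubled_Sequence.py | verify_sequence
-- ===== SOURCE A (Python) =====
-- def verify_sequence(sequence, n):
--     if len(sequence) != 2 * n:
--         return False
--
--     # Check if each number appears exactly twice
--     count = {}
--     for num in sequence:
--         if num not in count:
--             count[num] = 0
--         count[num] += 1
--         if count[num] > 2:
--             return False
--
--     # Check if each number from 1 to n appears exactly twice
--     for i in range(1, n + 1):
--         if count.get(i, 0) != 2:
--             return False
--
--     # Check if Ri - Li = i for each number
--     for i in range(1, n + 1):
--         left = sequence.index(i)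
--         right = len(sequence) - 1 - sequence[::-1].index(i)
--         if right - left != i:
--             return False
--
--     return True
-- ===== SOURCE B (Python) =====
-- def verify_sequence(sequence, n):
--     # Dict-free check: each i in 1..n must reappear exactly i places after its
--     # first occurrence; a counting argument makes this equivalent to A.
--     if len(sequence) != 2 * n:
--         return False
--     for i in range(1, n + 1):
--         try:
--             j = sequence.index(i)
--         except ValueError:
--             return False
--         k = j + i
--         if k >= len(sequence) or sequence[k] != i:
--             return False
--     return True
-- ===== Notes on version B (the rewrite author's own statement) =====
-- stated objective: simpler
-- what changed: B drops A's counting dict and the separate count/completeness passes: a single loop over 1..n checks (after the length guard) that i reappears exactly i places after its first occurrence; a counting argument (n values, each at least twice, in 2n slots) makes this equivalent to A's exact-count-plus-distance checks.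
import Mathlib
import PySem

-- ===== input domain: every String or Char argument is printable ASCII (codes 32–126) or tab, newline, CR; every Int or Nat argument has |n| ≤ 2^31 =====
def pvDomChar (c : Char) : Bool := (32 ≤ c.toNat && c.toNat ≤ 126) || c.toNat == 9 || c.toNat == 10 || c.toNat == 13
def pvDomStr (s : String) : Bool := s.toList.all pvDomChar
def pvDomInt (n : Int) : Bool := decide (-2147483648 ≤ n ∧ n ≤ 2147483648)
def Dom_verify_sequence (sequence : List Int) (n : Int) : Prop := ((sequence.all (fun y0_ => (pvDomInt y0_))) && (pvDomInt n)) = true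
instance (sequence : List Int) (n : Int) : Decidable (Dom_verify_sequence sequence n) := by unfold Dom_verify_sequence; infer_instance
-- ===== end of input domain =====

-- B replaces A's counting dict and three passes by a single range loop that checks,
-- for each i, that i reappears exactly i places after its first occurrence (objective: simpler).

-- ===== PORT A =====
-- phase 1: build the count dict, early None on a third occurrence
def vsCountLoop : List Int → PySem.Dict Int Int → Option (PySem.Dict Int Int)
  | [], c => some c
  | num :: rest, c =>
    let c1 := if (c.get? num).isNone then c.insert num 0 else c
    let c2 := c1.insert num (c1.getD num 0 + 1)
    if c2.getD num 0 > 2 then none else vsCountLoop rest c2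

-- phase 2: each i in the range must have count exactly 2
def vsCheckCounts (c : PySem.Dict Int Int) : List Int → Bool
  | [] => true
  | i :: rest => if c.getD i 0 ≠ 2 then false else vsCheckCounts c rest

-- phase 3 body: left = sequence.index(i); right = len-1 - sequence[::-1].index(i); right-left == i
-- (the `none` branches are unreachable after phase 2: Python would raise there)
def vsDistOne (seq : List Int) (i : Int) : Bool :=
  match PySem.List.index? seq i with
  | none => false
  | some left =>
    match PySem.List.slice? seq none none (-1) with
    | none => false
    | some rev =>
      match PySem.List.index? rev i with
      | none => false
      | some ridx =>
        decide (((seq.length : Int) - 1 - (ridx : Int)) - (left : Int) = i)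

def vsCheckDist (seq : List Int) : List Int → Bool
  | [] => true
  | i :: rest => if !(vsDistOne seq i) then false else vsCheckDist seq rest

def verify_sequence (sequence : List Int) (n : Int) : Bool :=
  if (sequence.length : Int) ≠ 2 * n then false
  else
    match vsCountLoop sequence PySem.Dict.empty with
    | none => false
    | some c =>
      if vsCheckCounts c (PySem.List.pyRange 1 (n + 1) 1) then
        vsCheckDist sequence (PySem.List.pyRange 1 (n + 1) 1)
      else false

-- ===== PORT B =====
-- loop body: j = sequence.index(i) (False on ValueError); k = j + i;
-- False unless k < len(sequence) and sequence[k] == i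
def vsAltOne (seq : List Int) (i : Int) : Bool :=
  match PySem.List.index? seq i with
  | none => false
  | some j =>
    if ((j : Int) + i ≥ (seq.length : Int) ∨ PySem.List.pyGet? seq ((j : Int) + i) ≠ some i)
    then false else true

def vsAltLoop (seq : List Int) : List Int → Bool
  | [] => true
  | i :: rest => if !(vsAltOne seq i) then false else vsAltLoop seq rest

def verify_sequence_alt (sequence : List Int) (n : Int) : Bool :=
  if (sequence.length : Int) ≠ 2 * n then false
  else vsAltLoop sequence (PySem.List.pyRange 1 (n + 1) 1)

-- ===== PRECONDITION & SPEC =====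
def Spec_verify_sequence (sequence : List Int) (n : Int) (out : Bool) : Prop := out = verify_sequence_alt sequence n
instance (sequence : List Int) (n : Int) (out : Bool) : Decidable (Spec_verify_sequence sequence n out) := by unfold Spec_verify_sequence; infer_instance

-- ===== CLAIM (what is proved, stated in full; the proofs are below) =====
def Claim_equal_verify_sequence : Prop := ∀ (sequence : List Int) (n : Int), Dom_verify_sequence sequence n → Spec_verify_sequence sequence n (verify_sequence sequence n)

-- ===== LEMMAS AND PROOFS =====

theorem vsCountLoop_some (rest : List Int) :
    ∀ (c : PySem.Dict Int Int) (g : Int → Int),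
      (∀ v, c.getD v 0 = g v) → (∀ v, 0 ≤ g v) →
      (∀ v, g v + (rest.count v : Int) ≤ 2) →
      ∃ c', vsCountLoop rest c = some c' ∧ ∀ v, c'.getD v 0 = g v + (rest.count v : Int) := by
  induction rest with
  | nil =>
    intro c g hg _ _
    exact ⟨c, rfl, by intro v; simp [hg v]⟩
  | cons num rest ih =>
    intro c g hg hg0 hb
    have hbnum := hb num
    have hcnum : (num :: rest).count num = rest.count num + 1 := by
      simp [List.count_cons]
    unfold vsCountLoop
    have hc1 : ∀ v, (if (c.get? num).isNone then c.insert num 0 else c).getD v 0 = g v := by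
      intro v
      by_cases hn : c.get? num = none
      · have h0 : g num = 0 := by rw [← hg num, PySem.Dict.getD_eq_get?_getD, hn]; rfl
        simp only [hn, Option.isNone_none, if_true]
        rw [PySem.Dict.getD_insert]
        split
        · next hv => rw [hv, h0]
        · exact hg v
      · simp [Option.isNone_iff_eq_none, hn, hg v]
    have hc2 : ∀ v, ((if (c.get? num).isNone then c.insert num 0 else c).insert num
        ((if (c.get? num).isNone then c.insert num 0 else c).getD num 0 + 1)).getD v 0
        = if v = num then g num + 1 else g v := by
      intro v
      rw [PySem.Dict.getD_insert, hc1 num]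
      by_cases hv : v = num
      · simp [hv]
      · simp only [if_neg hv]
        simpa using hc1 v
    have hle : g num + 1 ≤ 2 := by rw [hcnum] at hbnum; push_cast at hbnum; omega
    have hguard : ¬ ((2:Int) < ((if (c.get? num).isNone then c.insert num 0 else c).insert num
        ((if (c.get? num).isNone then c.insert num 0 else c).getD num 0 + 1)).getD num 0) := by
      rw [hc2 num, if_pos rfl]; omega
    simp only [gt_iff_lt, hguard, if_false]
    obtain ⟨c', hrun, hval⟩ := ih _ (fun v => if v = num then g num + 1 else g v) hc2
      (by intro v; by_cases hv : v = num
          · simp only []; rw [hv, if_pos rfl]; have := hg0 num; omega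
          · simp only []; rw [if_neg hv]; exact hg0 v)
      (by
        intro v
        by_cases hv : v = num
        · have h2 := hb num; rw [hcnum] at h2; push_cast at h2
          simp only []; rw [hv, if_pos rfl]; omega
        · simp only []; rw [if_neg hv]
          have := hb v
          have hcv : (num :: rest).count v = rest.count v := by
            simp [List.count_cons, Ne.symm hv]
          rw [hcv] at this; exact this)
    refine ⟨c', hrun, ?_⟩
    intro v
    rw [hval v]
    by_cases hv : v = num
    · subst hv; simp [hcnum]; push_cast; ring
    · simp [hv, List.count_cons, Ne.symm hv]

theorem vsCountLoop_none (rest : List Int) :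
    ∀ (c : PySem.Dict Int Int) (g : Int → Int),
      (∀ v, c.getD v 0 = g v) → (∀ v, 0 ≤ g v ∧ g v ≤ 2) →
      (∃ v, 2 < g v + (rest.count v : Int)) →
      vsCountLoop rest c = none := by
  induction rest with
  | nil =>
    intro c g hg hb ⟨v, hv⟩
    have h2 := (hb v).2
    simp only [List.count_nil, Nat.cast_zero, add_zero] at hv
    omega
  | cons num rest ih =>
    intro c g hg hb hex
    have hcnum : (num :: rest).count num = rest.count num + 1 := by
      simp [List.count_cons]
    unfold vsCountLoop
    have hc1 : ∀ v, (if (c.get? num).isNone then c.insert num 0 else c).getD v 0 = g v := by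
      intro v
      by_cases hn : c.get? num = none
      · have h0 : g num = 0 := by rw [← hg num, PySem.Dict.getD_eq_get?_getD, hn]; rfl
        simp only [hn, Option.isNone_none, if_true]
        rw [PySem.Dict.getD_insert]
        split
        · next hv => rw [hv, h0]
        · exact hg v
      · simp [Option.isNone_iff_eq_none, hn, hg v]
    have hc2 : ∀ v, ((if (c.get? num).isNone then c.insert num 0 else c).insert num
        ((if (c.get? num).isNone then c.insert num 0 else c).getD num 0 + 1)).getD v 0
        = if v = num then g num + 1 else g v := by
      intro v
      rw [PySem.Dict.getD_insert, hc1 num]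
      by_cases hv : v = num
      · simp [hv]
      · simp only [if_neg hv]
        simpa using hc1 v
    have hc2n : ((if (c.get? num).isNone then c.insert num 0 else c).insert num
        ((if (c.get? num).isNone then c.insert num 0 else c).getD num 0 + 1)).getD num 0
        = g num + 1 := by rw [hc2 num, if_pos rfl]
    by_cases hg2 : (2:Int) < g num + 1
    · simp only [gt_iff_lt, hc2n, if_pos hg2]
    · simp only [gt_iff_lt, hc2n, if_neg hg2]
      apply ih _ (fun v => if v = num then g num + 1 else g v) hc2
      · intro v
        by_cases hv : v = num
        · try simp only []
          rw [hv, if_pos rfl]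
          have := (hb num).1; omega
        · try simp only []
          rw [if_neg hv]
          exact hb v
      · obtain ⟨v, hv⟩ := hex
        refine ⟨v, ?_⟩
        by_cases hveq : v = num
        · try simp only []
          rw [hveq, if_pos rfl]
          rw [hveq, hcnum] at hv; push_cast at hv; omega
        · try simp only []
          rw [if_neg hveq]
          have hcv : (num :: rest).count v = rest.count v := by
            simp [List.count_cons, Ne.symm hveq]
          rw [hcv] at hv; exact hv

theorem vsCheckCounts_iff (c : PySem.Dict Int Int) (l : List Int) :
    vsCheckCounts c l = true ↔ ∀ i ∈ l, c.getD i 0 = 2 := by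
  induction l with
  | nil => simp [vsCheckCounts]
  | cons i rest ih => by_cases h : c.getD i 0 = 2 <;> simp [vsCheckCounts, h, ih]

theorem vsCheckDist_iff (seq : List Int) (l : List Int) :
    vsCheckDist seq l = true ↔ ∀ i ∈ l, vsDistOne seq i = true := by
  induction l with
  | nil => simp [vsCheckDist]
  | cons i rest ih => by_cases h : vsDistOne seq i = true <;> simp [vsCheckDist, h, ih]

theorem vsAltLoop_iff (seq : List Int) (l : List Int) :
    vsAltLoop seq l = true ↔ ∀ i ∈ l, vsAltOne seq i = true := by
  induction l with
  | nil => simp [vsAltLoop]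
  | cons i rest ih => by_cases h : vsAltOne seq i = true <;> simp [vsAltLoop, h, ih]

-- the split decomposition of a list in which v occurs exactly twice
theorem mem_split_not_mem {l : List Int} {v : Int} (h : v ∈ l) :
    ∃ p t, l = p ++ v :: t ∧ v ∉ p := by
  have h1 : (PySem.List.index? l v).isSome := (PySem.List.index?_isSome_iff l v).mpr h
  obtain ⟨k, hk⟩ := Option.isSome_iff_exists.mp h1
  obtain ⟨p, t, hseq, _, hvp⟩ := (PySem.List.index?_eq_some_iff l v k).mp hk
  exact ⟨p, t, hseq, hvp⟩

theorem count_two_split {seq : List Int} {v : Int} (h : seq.count v = 2) :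
    ∃ p q r, seq = p ++ v :: (q ++ v :: r) ∧ v ∉ p ∧ v ∉ q ∧ v ∉ r := by
  have hm : v ∈ seq := List.count_pos_iff.mp (by omega)
  obtain ⟨p, t, hseq, hvp⟩ := mem_split_not_mem hm
  subst hseq
  have hp0 : p.count v = 0 := List.count_eq_zero.mpr hvp
  have hct : t.count v = 1 := by
    simp [List.count_append, hp0] at h; omega
  have hmt : v ∈ t := List.count_pos_iff.mp (by omega)
  obtain ⟨q, r, hteq, hvq⟩ := mem_split_not_mem hmt
  subst hteq
  have hq0 : q.count v = 0 := List.count_eq_zero.mpr hvq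
  have hr0 : r.count v = 0 := by
    simp [List.count_append, hq0] at hct; omega
  exact ⟨p, q, r, rfl, hvp, hvq, List.count_eq_zero.mp hr0⟩

theorem index?_split (p t : List Int) (i : Int) (hp : i ∉ p) :
    PySem.List.index? (p ++ i :: t) i = some p.length :=
  (PySem.List.index?_eq_some_iff _ _ _).mpr ⟨p, t, rfl, rfl, hp⟩

theorem getElem?_second (p q r : List Int) (i : Int) :
    (p ++ i :: (q ++ i :: r))[p.length + q.length + 1]? = some i := by
  rw [List.getElem?_append_right (by omega)]
  have h1 : p.length + q.length + 1 - p.length = q.length + 1 := by omega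
  rw [h1]
  show (q ++ i :: r)[q.length]? = some i
  rw [List.getElem?_append_right (le_refl _)]
  simp

theorem pos_cases {p q r : List Int} {i : Int} (hp : i ∉ p) (hq : i ∉ q) (hr : i ∉ r)
    {m : Nat} (h : (p ++ i :: (q ++ i :: r))[m]? = some i) :
    m = p.length ∨ m = p.length + q.length + 1 := by
  by_cases h1 : m < p.length
  · rw [List.getElem?_append_left h1] at h
    exact absurd (List.mem_of_getElem? h) hp
  · push_neg at h1
    rw [List.getElem?_append_right h1] at h
    rcases Nat.exists_eq_add_of_le h1 with ⟨m1, rfl⟩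
    rw [Nat.add_sub_cancel_left] at h
    cases m1 with
    | zero => exact Or.inl (by omega)
    | succ m2 =>
      rw [List.getElem?_cons_succ] at h
      by_cases h2 : m2 < q.length
      · rw [List.getElem?_append_left h2] at h
        exact absurd (List.mem_of_getElem? h) hq
      · push_neg at h2
        rw [List.getElem?_append_right h2] at h
        rcases Nat.exists_eq_add_of_le h2 with ⟨m3, rfl⟩
        rw [Nat.add_sub_cancel_left] at h
        cases m3 with
        | zero => exact Or.inr (by omega)
        | succ m4 =>
          rw [List.getElem?_cons_succ] at h
          exact absurd (List.mem_of_getElem? h) hr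

theorem vsDistOne_split (p q r : List Int) (i : Int)
    (hp : i ∉ p) (hq : i ∉ q) (hr : i ∉ r) :
    vsDistOne (p ++ i :: (q ++ i :: r)) i = true ↔ i = (q.length : Int) + 1 := by
  unfold vsDistOne
  rw [index?_split p _ i hp]
  simp only []
  rw [PySem.List.slice?_none_none_neg_one]
  simp only []
  have hrev : (p ++ i :: (q ++ i :: r)).reverse = r.reverse ++ i :: (q.reverse ++ i :: p.reverse) := by
    simp
  rw [hrev]
  rw [index?_split r.reverse _ i (by simpa using hr)]
  simp only []
  simp only [decide_eq_true_eq]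
  have hlen : (p ++ i :: (q ++ i :: r)).length = p.length + q.length + r.length + 2 := by
    simp; omega
  rw [hlen]
  push_cast [List.length_reverse]
  constructor <;> intro h <;> omega

theorem vsAltOne_split (p q r : List Int) (i : Int) (hi : 1 ≤ i)
    (hp : i ∉ p) (hq : i ∉ q) (hr : i ∉ r) :
    vsAltOne (p ++ i :: (q ++ i :: r)) i = true ↔ i = (q.length : Int) + 1 := by
  unfold vsAltOne
  rw [index?_split p _ i hp]
  simp only []
  have hlen : ((p ++ i :: (q ++ i :: r)).length : Int) = (p.length : Int) + q.length + r.length + 2 := by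
    simp; push_cast; ring
  have hk : (p.length : Int) + i = ((p.length + i.toNat : Nat) : Int) := by push_cast; omega
  constructor
  · intro h
    by_cases hcond : ((p.length : Int) + i ≥ ((p ++ i :: (q ++ i :: r)).length : Int) ∨
        PySem.List.pyGet? (p ++ i :: (q ++ i :: r)) ((p.length : Int) + i) ≠ some i)
    · rw [if_pos hcond] at h; exact absurd h (by simp)
    · push_neg at hcond
      obtain ⟨hlt, hget⟩ := hcond
      rw [hk, PySem.List.pyGet?_natCast] at hget
      rcases pos_cases hp hq hr hget with hcase | hcase
      · omega
      · push_cast [hcase] at *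
        omega
  · intro h
    have hget : PySem.List.pyGet? (p ++ i :: (q ++ i :: r)) ((p.length : Int) + i) = some i := by
      rw [hk, PySem.List.pyGet?_natCast]
      have : p.length + i.toNat = p.length + q.length + 1 := by omega
      rw [this]
      exact getElem?_second p q r i
    rw [if_neg]
    push_neg
    refine ⟨by rw [hlen]; omega, hget⟩

theorem vsAltOne_two_le_count {seq : List Int} {i : Int} (hi : 1 ≤ i)
    (h : vsAltOne seq i = true) : 2 ≤ seq.count i := by
  unfold vsAltOne at h
  rcases hidx : PySem.List.index? seq i with _ | j
  · rw [hidx] at h; exact absurd h (by simp)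
  · rw [hidx] at h
    simp only [] at h
    obtain ⟨pre, suf, hseq, hlenj, hpre⟩ := (PySem.List.index?_eq_some_iff _ _ _).mp hidx
    by_cases hcond : ((j : Int) + i ≥ (seq.length : Int) ∨
        PySem.List.pyGet? seq ((j : Int) + i) ≠ some i)
    · rw [if_pos hcond] at h; exact absurd h (by simp)
    · push_neg at hcond
      obtain ⟨_, hget⟩ := hcond
      have hk : (j : Int) + i = ((j + i.toNat : Nat) : Int) := by push_cast; omega
      rw [hk, PySem.List.pyGet?_natCast] at hget
      subst hseq hlenj
      rw [List.getElem?_append_right (by omega)] at hget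
      have h3 : pre.length + i.toNat - pre.length = (i.toNat - 1) + 1 := by omega
      rw [h3, List.getElem?_cons_succ] at hget
      have hmem : i ∈ suf := List.mem_of_getElem? hget
      have h4 : 1 ≤ suf.count i := List.count_pos_iff.mpr hmem
      rw [List.count_append, List.count_cons_self]
      omega

-- the counting argument: length 2n and each of 1..n occurring at least twice forces exact counts
theorem counting {seq : List Int} {n : Int} (hlen : (seq.length : Int) = 2 * n)
    (h : ∀ i : Int, 1 ≤ i → i ≤ n → 2 ≤ seq.count i) :
    ∀ v : Int, (if 1 ≤ v ∧ v ≤ n then seq.count v = 2 else seq.count v = 0) := by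
  have hn : 0 ≤ n := by omega
  set F : Finset Int := Finset.Icc 1 n with hF
  have hcard : F.card = n.toNat := by rw [hF, Int.card_Icc]; congr 1; omega
  have hsum_all : ∑ a ∈ seq.toFinset, seq.count a = seq.length := by
    simpa using Multiset.toFinset_sum_count_eq (seq : Multiset Int)
  have hsub : F ⊆ seq.toFinset := by
    intro v hv
    rw [Finset.mem_Icc] at hv
    exact List.mem_toFinset.mpr (List.count_pos_iff.mp (by have := h v hv.1 hv.2; omega))
  have hFle : ∑ a ∈ F, seq.count a ≤ seq.length := by
    rw [← hsum_all]
    exact Finset.sum_le_sum_of_subset hsub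
  have hF2 : ∑ a ∈ F, 2 ≤ ∑ a ∈ F, seq.count a := by
    apply Finset.sum_le_sum
    intro v hv
    rw [hF, Finset.mem_Icc] at hv
    exact h v hv.1 hv.2
  have hconst : ∑ _a ∈ F, 2 = seq.length := by
    rw [Finset.sum_const, hcard, smul_eq_mul]; omega
  have hFeq : ∑ a ∈ F, seq.count a = seq.length := by omega
  have hpt : ∀ v ∈ F, seq.count v = 2 := by
    intro v hv
    have hiff := (Finset.sum_eq_sum_iff_of_le (s := F) (f := fun _ => 2)
      (g := fun a => seq.count a) (by
        intro w hw
        rw [hF, Finset.mem_Icc] at hw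
        exact h w hw.1 hw.2)).mp (by omega)
    exact (hiff v hv).symm
  intro v
  by_cases hv : 1 ≤ v ∧ v ≤ n
  · rw [if_pos hv]
    exact hpt v (by rw [hF, Finset.mem_Icc]; exact hv)
  · rw [if_neg hv]
    by_contra hne
    have hpos : 0 < seq.count v := by omega
    have hvmem : v ∈ seq.toFinset := List.mem_toFinset.mpr (List.count_pos_iff.mp hpos)
    have hvF : v ∉ F := by rw [hF, Finset.mem_Icc]; exact hv
    have hins : insert v F ⊆ seq.toFinset := by
      intro x hx
      rcases Finset.mem_insert.mp hx with rfl | hx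
      · exact hvmem
      · exact hsub hx
    have h1 : ∑ a ∈ insert v F, seq.count a ≤ seq.length := by
      rw [← hsum_all]
      exact Finset.sum_le_sum_of_subset hins
    rw [Finset.sum_insert hvF, hFeq] at h1
    omega

theorem A_iff (seq : List Int) (n : Int) :
    verify_sequence seq n = true ↔
      (seq.length : Int) = 2 * n ∧ (∀ v : Int, seq.count v ≤ 2) ∧
      (∀ i ∈ PySem.List.pyRange 1 (n + 1) 1, seq.count i = 2) ∧
      (∀ i ∈ PySem.List.pyRange 1 (n + 1) 1, vsDistOne seq i = true) := by
  unfold verify_sequence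
  by_cases hlen : (seq.length : Int) = 2 * n
  · rw [if_neg (not_not_intro hlen)]
    by_cases hcnt : ∀ v : Int, seq.count v ≤ 2
    · obtain ⟨c, hrun, hval⟩ := vsCountLoop_some seq PySem.Dict.empty (fun _ => 0)
        (fun v => by simp [PySem.Dict.getD_empty]) (fun v => le_refl 0)
        (fun v => by have := hcnt v; push_cast; omega)
      rw [hrun]
      try simp only []
      have hval' : ∀ v, c.getD v 0 = (seq.count v : Int) := by
        intro v; rw [hval v]; ring
      by_cases hcc : vsCheckCounts c (PySem.List.pyRange 1 (n + 1) 1) = true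
      · rw [if_pos hcc]
        rw [vsCheckCounts_iff] at hcc
        rw [vsCheckDist_iff]
        constructor
        · intro hd
          refine ⟨hlen, hcnt, ?_, hd⟩
          intro i hi
          have := hcc i hi
          rw [hval' i] at this
          exact_mod_cast this
        · exact fun ⟨_, _, _, hd⟩ => hd
      · rw [if_neg hcc]
        simp only [Bool.false_eq_true, false_iff]
        rintro ⟨-, -, hc2, -⟩
        exact hcc ((vsCheckCounts_iff c _).mpr (fun i hi => by
          rw [hval' i, hc2 i hi]; norm_num))
    · push_neg at hcnt
      obtain ⟨v, hv⟩ := hcnt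
      rw [vsCountLoop_none seq PySem.Dict.empty (fun _ => 0)
        (fun v => by simp [PySem.Dict.getD_empty]) (fun v => ⟨le_refl 0, by norm_num⟩)
        ⟨v, by push_cast; omega⟩]
      try simp only []
      simp only [Bool.false_eq_true, false_iff]
      rintro ⟨-, hle, -, -⟩
      exact absurd (hle v) (by omega)
  · rw [if_pos hlen]
    simp only [Bool.false_eq_true, false_iff]
    rintro ⟨h, -⟩
    exact hlen h

theorem B_iff (seq : List Int) (n : Int) :
    verify_sequence_alt seq n = true ↔
      (seq.length : Int) = 2 * n ∧
      (∀ i ∈ PySem.List.pyRange 1 (n + 1) 1, vsAltOne seq i = true) := by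
  unfold verify_sequence_alt
  by_cases h : (seq.length : Int) = 2 * n
  · simp [h, vsAltLoop_iff]
  · simp [h]

theorem main_iff (seq : List Int) (n : Int) (hlen : (seq.length : Int) = 2 * n) :
    ((∀ v : Int, seq.count v ≤ 2) ∧
      (∀ i ∈ PySem.List.pyRange 1 (n + 1) 1, seq.count i = 2) ∧
      (∀ i ∈ PySem.List.pyRange 1 (n + 1) 1, vsDistOne seq i = true)) ↔
      (∀ i ∈ PySem.List.pyRange 1 (n + 1) 1, vsAltOne seq i = true) := by
  constructor
  · rintro ⟨hle, hcnt, hdist⟩ i hi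
    have hi' : 1 ≤ i ∧ i < n + 1 := (PySem.List.mem_pyRange_one).mp hi
    obtain ⟨p, q, r, hseq, hp, hq, hr⟩ := count_two_split (hcnt i hi)
    subst hseq
    rw [vsAltOne_split p q r i hi'.1 hp hq hr]
    rw [← vsDistOne_split p q r i hp hq hr]
    exact hdist i hi
  · intro hall
    have h2 : ∀ i : Int, 1 ≤ i → i ≤ n → 2 ≤ seq.count i := by
      intro i h1 h2
      exact vsAltOne_two_le_count h1 (hall i ((PySem.List.mem_pyRange_one).mpr ⟨h1, by omega⟩))
    have hfact := counting hlen h2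
    have hcnt : ∀ i ∈ PySem.List.pyRange 1 (n + 1) 1, seq.count i = 2 := by
      intro i hi
      have hi' : 1 ≤ i ∧ i < n + 1 := (PySem.List.mem_pyRange_one).mp hi
      have := hfact i
      rw [if_pos ⟨hi'.1, by omega⟩] at this
      exact this
    refine ⟨?_, hcnt, ?_⟩
    · intro v
      have := hfact v
      by_cases hv : 1 ≤ v ∧ v ≤ n
      · rw [if_pos hv] at this; omega
      · rw [if_neg hv] at this; omega
    · intro i hi
      have hi' : 1 ≤ i ∧ i < n + 1 := (PySem.List.mem_pyRange_one).mp hi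
      obtain ⟨p, q, r, hseq, hp, hq, hr⟩ := count_two_split (hcnt i hi)
      subst hseq
      rw [vsDistOne_split p q r i hp hq hr]
      rw [← vsAltOne_split p q r i hi'.1 hp hq hr]
      exact hall i hi

-- ===== VERDICT (by name: the statement is the Claim_ definition above) =====
theorem verify_sequence_spec : Claim_equal_verify_sequence := by
  intro seq n _
  unfold Spec_verify_sequence
  by_cases hlen : (seq.length : Int) = 2 * n
  · rw [Bool.eq_iff_iff, A_iff, B_iff]
    constructor
    · rintro ⟨_, h1, h2, h3⟩
      exact ⟨hlen, (main_iff seq n hlen).mp ⟨h1, h2, h3⟩⟩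
    · rintro ⟨_, hall⟩
      obtain ⟨h1, h2, h3⟩ := (main_iff seq n hlen).mpr hall
      exact ⟨hlen, h1, h2, h3⟩
  · unfold verify_sequence verify_sequence_alt
    rw [if_pos hlen, if_pos hlen]
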